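-- pv_equiv track=rewrite | github.com/Memonto-Mori/Algorimto-VLC-de-procesamiento | Grafica_invernadero.py | sum_prod_logic
-- ===== SOURCE A (Python) =====
-- def sum_prod_logic(sdm_values, cropped_values):
--     sum_prod_values = []
--     for i in range(len(sdm_values)):
--         if i < 4:
--             sum_prod_values.append(0)
--         else:
--             sum_prod = sum(sdm_values[i-4+j] * cropped_values[i-4+j] * 1400 for j in range(4))
--             sum_prod_values.append(sum_prod)
--     return sum_prod_values
-- ===== SOURCE B (Python) =====
-- def sum_prod_logic(sdm_values, cropped_values):
--     # Running prefix sums of the scaled products; each window-4 sum is a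
--     # difference of two prefix sums (exact on ints), O(1) work per output.
--     pref = [0]
--     acc = 0
--     for s, c in zip(sdm_values, cropped_values):
--         acc += s * c * 1400
--         pref.append(acc)
--     n = len(sdm_values)
--     out = [0] * min(4, n)
--     for i in range(4, n):
--         out.append(pref[i] - pref[i - 4])
--     return out
-- ===== Notes on version B (the rewrite author's own statement) =====
-- stated objective: faster
-- what changed: B builds a running prefix-sum table of the scaled products and emits each width-4 window as a difference of two prefix sums, instead of recomputing a 4-term product sum per output element; exact because all values are ints.
import Mathlib
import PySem

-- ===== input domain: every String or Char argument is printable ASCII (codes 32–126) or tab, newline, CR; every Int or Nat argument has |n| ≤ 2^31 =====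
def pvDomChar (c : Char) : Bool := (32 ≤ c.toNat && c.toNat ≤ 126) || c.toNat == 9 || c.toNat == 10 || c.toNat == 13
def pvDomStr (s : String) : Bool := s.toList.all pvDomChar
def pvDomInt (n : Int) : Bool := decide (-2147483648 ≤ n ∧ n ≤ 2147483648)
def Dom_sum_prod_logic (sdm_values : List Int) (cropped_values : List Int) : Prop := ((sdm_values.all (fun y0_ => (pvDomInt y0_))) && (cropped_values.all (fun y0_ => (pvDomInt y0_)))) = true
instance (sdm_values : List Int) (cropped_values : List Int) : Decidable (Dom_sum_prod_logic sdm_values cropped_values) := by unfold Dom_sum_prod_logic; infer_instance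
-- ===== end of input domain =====

-- B replaces the per-window 4-term product sum by a running prefix-sum table of the
-- scaled products, emitting each window as a difference of two prefix sums (exact on ints).


-- ===== PORT A =====
-- literal transliteration of A: loop over range(len(sdm)); for i ≥ 4 an inner
-- generator-sum over range(4) of sdm[i-4+j]*cropped[i-4+j]*1400 (indexing via
-- pyGetD; in range under Pre_).
def sum_prod_logic (sdm_values : List Int) (cropped_values : List Int) : List Int :=
  (PySem.List.pyRange 0 (PySem.List.len sdm_values) 1).foldl
    (fun acc i =>
      if i < 4 then acc ++ [0]
      else
        acc ++ [(PySem.List.pyRange 0 4 1).foldl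
          (fun s j => s + PySem.List.pyGetD sdm_values (i - 4 + j) 0
                        * PySem.List.pyGetD cropped_values (i - 4 + j) 0 * 1400) 0])
    []

-- ===== PORT B =====
-- literal transliteration of B: one pass over zip builds (pref, acc), the running
-- prefix sums of s*c*1400; then [0]*min(4,n) followed by pref[i] - pref[i-4].
def sum_prod_logic_alt (sdm_values : List Int) (cropped_values : List Int) : List Int :=
  let st := (sdm_values.zip cropped_values).foldl
    (fun st sc =>
      let acc := st.2 + sc.1 * sc.2 * 1400
      (st.1 ++ [acc], acc)) ([(0 : Int)], (0 : Int))
  let pref := st.1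
  let n := PySem.List.len sdm_values
  List.replicate (min 4 n.toNat) 0 ++
    (PySem.List.pyRange 4 n 1).foldl
      (fun out i => out ++ [PySem.List.pyGetD pref i 0 - PySem.List.pyGetD pref (i - 4) 0]) []

-- ===== PRECONDITION & SPEC =====
-- Pre_ excludes exactly the inputs where A raises IndexError (cropped_values too short
-- to serve the windows); A is total otherwise.
def Pre_sum_prod_logic (sdm_values : List Int) (cropped_values : List Int) : Prop :=
  sdm_values.length ≤ 4 ∨ sdm_values.length ≤ cropped_values.length + 1
instance (sdm_values : List Int) (cropped_values : List Int) : Decidable (Pre_sum_prod_logic sdm_values cropped_values) := by unfold Pre_sum_prod_logic; infer_instance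

def pvWitness_sum_prod_logic : List Int × List Int := ([1, 2, 3, 4, 5, 6], [2, 1, 0, 3, 1, 2])

def Spec_sum_prod_logic (sdm_values : List Int) (cropped_values : List Int) (out : List Int) : Prop := out = sum_prod_logic_alt sdm_values cropped_values
instance (sdm_values : List Int) (cropped_values : List Int) (out : List Int) : Decidable (Spec_sum_prod_logic sdm_values cropped_values out) := by unfold Spec_sum_prod_logic; infer_instance

-- ===== CLAIM (what is proved, stated in full; the proofs are below) =====
def Claim_equal_sum_prod_logic : Prop := ∀ (sdm_values : List Int) (cropped_values : List Int), Dom_sum_prod_logic sdm_values cropped_values → Pre_sum_prod_logic sdm_values cropped_values → Spec_sum_prod_logic sdm_values cropped_values (sum_prod_logic sdm_values cropped_values)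

-- ===== LEMMAS AND PROOFS =====

-- the prefix-sum fold, characterised: the list is l plus the running sums starting at a
lemma scan_fold (p : List Int) : ∀ (l : List Int) (a : Int),
    (p.foldl (fun st x => (st.1 ++ [st.2 + x], st.2 + x)) (l, a)).1
      = l ++ (List.range p.length).map (fun k => a + (p.take (k+1)).sum) := by
  induction p with
  | nil => intro l a; simp
  | cons x xs ih =>
    intro l a
    simp only [List.foldl_cons]
    rw [ih]
    simp [List.range_succ_eq_map, List.map_map, Function.comp_def, add_assoc]

-- prefix-sum table entry = sum of the first k products
lemma pref_getD (p : List Int) (k : Nat) (hk : k ≤ p.length) :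
    ((p.foldl (fun st x => (st.1 ++ [st.2 + x], st.2 + x)) ([(0:Int)], (0:Int))).1).getD k 0
      = (p.take k).sum := by
  rw [scan_fold]
  cases k with
  | zero => simp
  | succ k' =>
    have hk' : k' < p.length := by omega
    rw [List.getD_eq_getElem _ _ (by simpa using hk')]
    simp [hk']

-- sum of a 4-element window of p, as explicit elements
lemma sum_take4_drop (p : List Int) (a : Nat) (h : a + 4 ≤ p.length) :
    ((p.drop a).take 4).sum = p.getD a 0 + p.getD (a+1) 0 + p.getD (a+2) 0 + p.getD (a+3) 0 := by
  induction p generalizing a with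
  | nil => simp at h
  | cons x xs ih =>
    cases a with
    | zero =>
      match xs, h with
      | y :: z :: w :: _, _ => simp [List.getD]; ring
    | succ a' =>
      simp only [List.drop_succ_cons, List.getD_cons_succ]
      exact ih a' (by simpa using h)

-- the products table element
lemma zip_prod_getD (xs ys : List Int) (k : Nat) (hx : k < xs.length) (hy : k < ys.length) :
    ((xs.zip ys).map (fun sc => sc.1 * sc.2 * 1400)).getD k 0 = xs.getD k 0 * ys.getD k 0 * 1400 := by
  have hk : k < (xs.zip ys).length := by simp [List.length_zip]; omega
  rw [List.getD_eq_getElem _ _ (by simpa using hk), List.getD_eq_getElem _ _ hx,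
      List.getD_eq_getElem _ _ hy]
  simp [List.getElem_zip]

-- ===== VERDICT (by name: the statement is the Claim_ definition above) =====
theorem sum_prod_logic_spec : Claim_equal_sum_prod_logic := by
  intro sdm cropped _ hpre
  unfold Spec_sum_prod_logic sum_prod_logic sum_prod_logic_alt
  simp only []
  -- names
  set n : Int := PySem.List.len sdm with hn
  have hn0 : n = (sdm.length : Int) := by simp [hn, PySem.List.len]
  set p : List Int := (sdm.zip cropped).map (fun sc => sc.1 * sc.2 * 1400) with hp
  -- B's fold over the zip = the same fold over the products table
  have hfold : (sdm.zip cropped).foldl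
      (fun st sc =>
        let acc := st.2 + sc.1 * sc.2 * 1400
        (st.1 ++ [acc], acc)) ([(0:Int)], (0:Int))
      = p.foldl (fun st x => (st.1 ++ [st.2 + x], st.2 + x)) ([(0:Int)], (0:Int)) := by
    rw [hp, List.foldl_map]
  rw [hfold]
  set pref : List Int := (p.foldl (fun st x => (st.1 ++ [st.2 + x], st.2 + x)) ([(0:Int)], (0:Int))).1 with hpref
  -- both sides become concatenations split at min 4 n
  have hA1 : (fun (acc : List Int) (i : Int) =>
      if i < 4 then acc ++ [0]
      else acc ++ [(PySem.List.pyRange 0 4 1).foldl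
        (fun s j => s + PySem.List.pyGetD sdm (i - 4 + j) 0
                      * PySem.List.pyGetD cropped (i - 4 + j) 0 * 1400) 0])
      = (fun acc i => acc ++ [if i < 4 then 0
          else (PySem.List.pyRange 0 4 1).foldl
        (fun s j => s + PySem.List.pyGetD sdm (i - 4 + j) 0
                      * PySem.List.pyGetD cropped (i - 4 + j) 0 * 1400) 0]) := by
    funext acc i; split <;> rfl
  have hnn : (0 : Int) ≤ n := by rw [hn0]; exact_mod_cast Nat.zero_le _
  have hm1 : (0 : Int) ≤ min 4 n := by omega
  have hm2 : min 4 n ≤ n := by omega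
  rw [hA1, PySem.List.foldl_append_singleton_eq_map, List.nil_append,
      PySem.List.pyRange_one_append 0 (min 4 n) n hm1 hm2, List.map_append,
      PySem.List.foldl_append_singleton_eq_map, List.nil_append]
  -- the tail range of A equals B's range: pyRange (min 4 n) n 1 = pyRange 4 n 1
  have htail : PySem.List.pyRange (min 4 n) n 1 = PySem.List.pyRange 4 n 1 := by
    by_cases h : (4 : Int) ≤ n
    · rw [min_eq_left h]
    · rw [min_eq_right (by omega : n ≤ 4), PySem.List.pyRange_one_eq_nil (le_refl n),
          PySem.List.pyRange_one_eq_nil (by omega : n ≤ 4)]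
  rw [htail]
  congr 1
  -- head part: all entries are 0
  · have hlen : (PySem.List.pyRange 0 (min 4 n) 1).length = (min 4 n).toNat := by
      rw [PySem.List.length_pyRange_one]; congr 1; omega
    rw [List.eq_replicate_iff]
    refine ⟨by rw [List.length_map, hlen]; omega, ?_⟩
    intro b hb
    rw [List.mem_map] at hb
    obtain ⟨i, hi, rfl⟩ := hb
    rw [PySem.List.mem_pyRange_one] at hi
    have : i < 4 := by omega
    simp [this]
  -- tail part: window sum = prefix difference, elementwise
  · apply List.map_congr_left
    intro i hi
    rw [PySem.List.mem_pyRange_one] at hi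
    have h4 : ¬ i < 4 := by omega
    simp only [h4, if_false]
    obtain ⟨m, rfl⟩ : ∃ m : Nat, i = (m : Int) := ⟨i.toNat, by omega⟩
    have hm4 : 4 ≤ m := by exact_mod_cast hi.1
    have hmlen : m < sdm.length := by rw [hn0] at hi; exact_mod_cast hi.2
    have hc : m ≤ cropped.length := by
      unfold Pre_sum_prod_logic at hpre; rcases hpre with h | h <;> omega
    have hplen : m ≤ p.length := by
      rw [hp, List.length_map, List.length_zip]; omega
    -- RHS: prefix difference = window sum
    have hgi : PySem.List.pyGetD pref (m : Int) 0 = (p.take m).sum := by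
      rw [PySem.List.pyGetD_natCast, hpref, pref_getD p m hplen]
    have hs4 : ((m : Int) - 4) = ((m - 4 : Nat) : Int) := by omega
    have hgi4 : PySem.List.pyGetD pref ((m : Int) - 4) 0 = (p.take (m - 4)).sum := by
      rw [hs4, PySem.List.pyGetD_natCast, hpref, pref_getD p (m - 4) (by omega)]
    have hsplit : (p.take m).sum - (p.take (m - 4)).sum = ((p.drop (m - 4)).take 4).sum := by
      have hsum : (p.take m).sum = (p.take (m-4)).sum + ((p.drop (m-4)).take 4).sum := by
        conv_lhs => rw [show m = (m - 4) + 4 by omega]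
        rw [List.take_add, List.sum_append]
      omega
    rw [hgi, hgi4, hsplit, sum_take4_drop p (m - 4) (by omega)]
    -- LHS: unfold the 4-step inner sum and identify each term with a table entry
    have hr4 : PySem.List.pyRange 0 4 1 = [0, 1, 2, 3] := by decide
    rw [hr4]
    simp only [List.foldl]
    have hz : ∀ k : Nat, k < sdm.length → k < cropped.length →
        p.getD k 0 = sdm.getD k 0 * cropped.getD k 0 * 1400 :=
      fun k h1 h2 => zip_prod_getD sdm cropped k h1 h2
    have hidx : ∀ j : Int, 0 ≤ j → j < 4 →
        PySem.List.pyGetD sdm ((m : Int) - 4 + j) 0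
          * PySem.List.pyGetD cropped ((m : Int) - 4 + j) 0 * 1400
        = p.getD (m - 4 + j.toNat) 0 := by
      intro j hj0 hj4
      have he : (m : Int) - 4 + j = ((m - 4 + j.toNat : Nat) : Int) := by omega
      rw [he, PySem.List.pyGetD_natCast, PySem.List.pyGetD_natCast,
          hz (m - 4 + j.toNat) (by omega) (by omega)]
    have h0 := hidx 0 (by norm_num) (by norm_num)
    have h1 := hidx 1 (by norm_num) (by norm_num)
    have h2 := hidx 2 (by norm_num) (by norm_num)
    have h3 := hidx 3 (by norm_num) (by norm_num)
    simp only [Int.toNat_zero, Int.toNat_one, add_zero] at h0 h1 h2 h3 ⊢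
    rw [h0, h1, h2, h3, show Int.toNat 2 = 2 from rfl, show Int.toNat 3 = 3 from rfl]
    ring
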